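-- pv_equiv track=rewrite | github.com/Vishal260700/Placement_Codes | Company Codes/SAP_LABS.py | maxSubsequenceSubstring
-- ===== SOURCE A (Python) =====
-- MAX = 1000
--
-- def maxSubsequenceSubstring(x, y, n, m):
-- 	dp = [[0 for i in range(MAX)]
-- 			for i in range(MAX)]
--
-- 	# Initialize the dp[][] to 0.
--
-- 	# Calculating value for each element.
-- 	for i in range(1, m + 1):
-- 		for j in range(1, n + 1):
--
-- 			# If alphabet of string
-- 			# X and Y are equal make
-- 			# dp[i][j] = 1 + dp[i-1][j-1]
-- 			if(x[j - 1] == y[i - 1]):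
-- 				dp[i][j] = 1 + dp[i - 1][j - 1]
--
-- 			# Else copy the previous value
-- 			# in the row i.e dp[i-1][j-1]
-- 			else:
-- 				dp[i][j] = dp[i][j - 1]
--
-- 	# Finding the maximum length
-- 	ans = 0
-- 	for i in range(1, m + 1):
-- 		ans = max(ans, dp[i][n])
-- 	return ans
-- ===== SOURCE B (Python) =====
-- def maxSubsequenceSubstring(x, y, n, m):
--     # Greedy two-pointer per start index of y: no DP table at all.
--     ans = 0
--     for s in range(m):
--         j = 0
--         cnt = 0
--         while j < n and s + cnt < m:
--             if x[j] == y[s + cnt]: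
--                 cnt += 1
--             j += 1
--         if cnt > ans:
--             ans = cnt
--     return ans
-- ===== Notes on version B (the rewrite author's own statement) =====
-- stated objective: faster
-- what changed: Replaced the fixed 1000x1000 DP table with a per-start greedy two-pointer scan: for each start s of y, advance a pointer through x matching y[s], y[s+1], ... and take the maximum matched count.
import Mathlib
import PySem

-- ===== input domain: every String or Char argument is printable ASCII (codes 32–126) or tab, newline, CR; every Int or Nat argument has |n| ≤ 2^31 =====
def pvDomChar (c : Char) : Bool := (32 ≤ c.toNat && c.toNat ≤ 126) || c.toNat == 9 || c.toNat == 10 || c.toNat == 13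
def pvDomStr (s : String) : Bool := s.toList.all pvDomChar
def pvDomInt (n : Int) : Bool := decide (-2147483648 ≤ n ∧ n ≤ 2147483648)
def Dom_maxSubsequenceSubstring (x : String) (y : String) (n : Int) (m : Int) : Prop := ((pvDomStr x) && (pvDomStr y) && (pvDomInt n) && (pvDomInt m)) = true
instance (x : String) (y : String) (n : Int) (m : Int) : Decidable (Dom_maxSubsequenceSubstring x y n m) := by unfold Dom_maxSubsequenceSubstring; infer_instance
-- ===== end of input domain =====

-- B replaces A's fixed 1000x1000 DP table with a per-start greedy two-pointer scan (less memory, no fixed-size table).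

-- ===== PORT A =====
-- dp[i][j] read (Python indexing semantics, possibly negative j at the final dp[i][n] read)
def pvDget (dp : List (List Int)) (i j : Int) : Int :=
  (PySem.List.pyGet? ((PySem.List.pyGet? dp i).getD []) j).getD 0

-- dp[i][j] = v (write sites always have i,j ≥ 1)
def pvDset (dp : List (List Int)) (i j : Int) (v : Int) : List (List Int) :=
  dp.set i.toNat (((PySem.List.pyGet? dp i).getD []).set j.toNat v)

def maxSubsequenceSubstring (x : String) (y : String) (n : Int) (m : Int) : Int :=
  let dp0 : List (List Int) := List.replicate 1000 (List.replicate 1000 0)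
  let dp := (PySem.List.pyRange 1 (m+1) 1).foldl (fun dp i =>
      (PySem.List.pyRange 1 (n+1) 1).foldl (fun dp j =>
        if PySem.List.pyGet? x.toList (j-1) = PySem.List.pyGet? y.toList (i-1)
        then pvDset dp i j (1 + pvDget dp (i-1) (j-1))
        else pvDset dp i j (pvDget dp i (j-1))) dp) dp0
  (PySem.List.pyRange 1 (m+1) 1).foldl (fun ans i => max ans (pvDget dp i n)) 0

-- ===== PORT B =====
-- the inner 'while j < n and s + cnt < m' loop of Source B
def pvBLoop (xs ys : List Char) (n m s j cnt : Int) : Int :=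
  if _h : j < n ∧ s + cnt < m then
    pvBLoop xs ys n m s (j+1)
      (if PySem.List.pyGet? xs j = PySem.List.pyGet? ys (s+cnt) then cnt+1 else cnt)
  else cnt
termination_by (n - j).toNat
decreasing_by omega

def maxSubsequenceSubstring_alt (x : String) (y : String) (n : Int) (m : Int) : Int :=
  (PySem.List.pyRange 0 m 1).foldl (fun ans s =>
    let cnt := pvBLoop x.toList y.toList n m s 0 0
    if cnt > ans then cnt else ans) 0

-- ===== PRECONDITION & SPEC =====
-- Pre_ is exactly where A returns: it excludes only inputs where A raises IndexError
-- (n or m exceeding the string length or the fixed table bound 999, or n < -1000 with m ≥ 1).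
def Pre_maxSubsequenceSubstring (x : String) (y : String) (n : Int) (m : Int) : Prop :=
  m ≤ 0 ∨ (1 ≤ m ∧ m ≤ 999 ∧
    ((-1000 ≤ n ∧ n ≤ 0) ∨
     (1 ≤ n ∧ n ≤ 999 ∧ n ≤ (x.toList.length : Int) ∧ m ≤ (y.toList.length : Int))))
instance (x : String) (y : String) (n : Int) (m : Int) : Decidable (Pre_maxSubsequenceSubstring x y n m) := by
  unfold Pre_maxSubsequenceSubstring; infer_instance

def pvWitness_maxSubsequenceSubstring : String × String × Int × Int := ("abcab", "bab", 5, 3)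

def Spec_maxSubsequenceSubstring (x : String) (y : String) (n : Int) (m : Int) (out : Int) : Prop := out = maxSubsequenceSubstring_alt x y n m
instance (x : String) (y : String) (n : Int) (m : Int) (out : Int) : Decidable (Spec_maxSubsequenceSubstring x y n m out) := by unfold Spec_maxSubsequenceSubstring; infer_instance

-- ===== CLAIM (what is proved, stated in full; the proofs are below) =====
def Claim_equal_maxSubsequenceSubstring : Prop := ∀ (x : String) (y : String) (n : Int) (m : Int), Dom_maxSubsequenceSubstring x y n m → Pre_maxSubsequenceSubstring x y n m → Spec_maxSubsequenceSubstring x y n m (maxSubsequenceSubstring x y n m)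

-- ===== LEMMAS AND PROOFS =====


-- greedy matching: pvGre xs z = length of the longest prefix of z that is a sublist (subsequence) of xs
def pvGre : List Char → List Char → Nat
  | _, [] => 0
  | [], _ :: _ => 0
  | a :: xs, b :: zs => if a = b then pvGre xs zs + 1 else pvGre xs (b :: zs)

lemma pvGre_nil_left (z : List Char) : pvGre [] z = 0 := by
  cases z <;> rfl

lemma pvGre_le_length (xs : List Char) : ∀ z : List Char, pvGre xs z ≤ z.length := by
  induction xs with
  | nil => intro z; rw [pvGre_nil_left]; exact Nat.zero_le _
  | cons a xs ih =>
    intro z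
    cases z with
    | nil => simp [pvGre]
    | cons b zs =>
      by_cases h : a = b
      · simp only [pvGre, if_pos h, List.length_cons]
        exact Nat.succ_le_succ (ih zs)
      · simp only [pvGre, if_neg h]
        exact ih (b :: zs)

lemma pvGre_take_sublist (xs : List Char) : ∀ z : List Char, (z.take (pvGre xs z)).Sublist xs := by
  induction xs with
  | nil => intro z; rw [pvGre_nil_left]; simp
  | cons a xs ih =>
    intro z
    cases z with
    | nil => simp [pvGre]
    | cons b zs =>
      by_cases h : a = b
      · simp only [pvGre, if_pos h, List.take_succ_cons]
        subst h
        exact List.cons_sublist_cons.mpr (ih zs)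
      · simp only [pvGre, if_neg h]
        exact ((ih (b :: zs))).cons a

lemma pvGre_ge (xs : List Char) :
    ∀ (z : List Char) (l : Nat), l ≤ z.length → (z.take l).Sublist xs → l ≤ pvGre xs z := by
  induction xs with
  | nil =>
    intro z l hl hs
    rw [List.sublist_nil] at hs
    rcases List.take_eq_nil_iff.mp hs with h | h
    · omega
    · subst h; simp at hl; omega
  | cons a xs ih =>
    intro z l hl hs
    cases z with
    | nil => simp at hl; omega
    | cons b zs =>
      cases l with
      | zero => exact Nat.zero_le _
      | succ l =>
        simp only [List.take_succ_cons] at hs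
        by_cases h : a = b
        · subst h
          have hs' : (zs.take l).Sublist xs := by
            cases hs with
            | cons _ h2 => exact List.sublist_of_cons_sublist h2
            | cons₂ _ h2 => exact h2
          have := ih zs l (by simpa using hl) hs'
          simp [pvGre]
          omega
        · have hs' : ((b :: zs).take (l+1)).Sublist xs := by
            cases hs with
            | cons _ h2 => simpa using h2
            | cons₂ _ h2 => exact absurd rfl h
          simp only [pvGre, if_neg h]
          exact ih (b :: zs) (l+1) (by simpa using hl) (by simpa using hs')


-- the B-side while loop computes cnt + greedy count on the remaining slices
lemma pvBLoop_eq (x y : List Char) (n m s : Int)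
    (hnx : n ≤ (x.length : Int)) (hmy : m ≤ (y.length : Int)) (hs : 0 ≤ s) :
    ∀ (fuel : Nat) (j cnt : Int), (n - j).toNat = fuel → 0 ≤ j → 0 ≤ cnt → s + cnt ≤ m →
      pvBLoop x y n m s j cnt =
        cnt + pvGre ((x.take n.toNat).drop j.toNat) ((y.take m.toNat).drop (s + cnt).toNat) := by
  intro fuel
  induction fuel using Nat.strong_induction_on with
  | _ fuel IH =>
    intro j cnt hfuel hj hc hscm
    rw [pvBLoop]
    by_cases h : j < n ∧ s + cnt < m
    · have hjx : j < (x.length : Int) := lt_of_lt_of_le h.1 hnx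
      have hjtn : j.toNat < n.toNat := by omega
      have hjlen : j.toNat < (x.take n.toNat).length := by
        rw [List.length_take]; omega
      have hsy : s + cnt < (y.length : Int) := lt_of_lt_of_le h.2 hmy
      have hstn : (s + cnt).toNat < m.toNat := by omega
      have hslen : (s + cnt).toNat < (y.take m.toNat).length := by
        rw [List.length_take]; omega
      have hxg : PySem.List.pyGet? x j = some (x.take n.toNat)[j.toNat] := by
        rw [PySem.List.pyGet?_eq_some_getElem x hj hjx, List.getElem_take]
      have hyg : PySem.List.pyGet? y (s + cnt) = some (y.take m.toNat)[(s + cnt).toNat] := by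
        rw [PySem.List.pyGet?_eq_some_getElem y (by omega) hsy, List.getElem_take]
      have hdx : (x.take n.toNat).drop j.toNat
          = (x.take n.toNat)[j.toNat] :: (x.take n.toNat).drop (j.toNat + 1) :=
        List.drop_eq_getElem_cons hjlen
      have hdy : (y.take m.toNat).drop (s + cnt).toNat
          = (y.take m.toNat)[(s + cnt).toNat] :: (y.take m.toNat).drop ((s + cnt).toNat + 1) :=
        List.drop_eq_getElem_cons hslen
      rw [dif_pos h, hxg, hyg, hdx, hdy]
      by_cases hceq : (x.take n.toNat)[j.toNat] = (y.take m.toNat)[(s + cnt).toNat]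
      · rw [if_pos (by rw [hceq]), IH (n - (j+1)).toNat (by omega) (j+1) (cnt+1) rfl (by omega) (by omega) (by omega)]
        have e1 : (j + 1).toNat = j.toNat + 1 := by omega
        have e2 : (s + (cnt + 1)).toNat = (s + cnt).toNat + 1 := by omega
        rw [e1]
        have e3 : s + (cnt + 1) = s + cnt + 1 := by ring
        rw [e3] at *
        have e4 : (s + cnt + 1).toNat = (s + cnt).toNat + 1 := by omega
        rw [e4]
        simp [pvGre, hceq]
        ring
      · rw [if_neg (by simpa using hceq), IH (n - (j+1)).toNat (by omega) (j+1) cnt rfl (by omega) hc hscm]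
        have e1 : (j + 1).toNat = j.toNat + 1 := by omega
        rw [e1, hdy]
        have hceq2 : ¬ (x[j.toNat] = y[(s + cnt).toNat]) := by
          simpa [List.getElem_take] using hceq
        simp [pvGre, List.getElem_take, hceq2]
    · rw [dif_neg h]
      rcases not_and_or.mp h with h1 | h1
      · have : n.toNat ≤ j.toNat := by omega
        have hnil : (x.take n.toNat).drop j.toNat = [] := by
          apply List.drop_eq_nil_of_le
          rw [List.length_take]; omega
        rw [hnil, pvGre_nil_left]; ring
      · have heq : s + cnt = m := le_antisymm hscm (by omega)
        have hnil : (y.take m.toNat).drop (s + cnt).toNat = [] := by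
          apply List.drop_eq_nil_of_le
          rw [List.length_take]; omega
        rw [hnil]
        simp [pvGre]


-- the pure DP recurrence behind A's table
def pvDpf (x y : List Char) : Nat → Nat → Int
  | 0, _ => 0
  | _ + 1, 0 => 0
  | i + 1, j + 1 =>
    if x.getD j ' ' = y.getD i ' ' then pvDpf x y i j + 1 else pvDpf x y (i + 1) j
termination_by i j => (i, j)

lemma pvDpf_zero_right (x y : List Char) (i : Nat) : pvDpf x y i 0 = 0 := by
  cases i <;> simp [pvDpf]

lemma pvDpf_nonneg (x y : List Char) : ∀ i j, 0 ≤ pvDpf x y i j := by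
  intro i
  induction i with
  | zero => intro j; simp [pvDpf]
  | succ i ih =>
    intro j
    induction j with
    | zero => simp [pvDpf_zero_right]
    | succ j ihj =>
      rw [pvDpf]
      split
      · have := ih j; omega
      · exact ihj

lemma pvDpf_le (x y : List Char) : ∀ i j, pvDpf x y i j ≤ i := by
  intro i
  induction i with
  | zero => intro j; simp [pvDpf]
  | succ i ih =>
    intro j
    induction j with
    | zero => rw [pvDpf_zero_right]; omega
    | succ j ihj =>
      rw [pvDpf]
      split
      · have := ih j; omega
      · omega

-- cell access of the table
def pvCell (dp : List (List Int)) (r c : Nat) : Int := ((dp[r]?.getD []).getD c 0)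

lemma pvDget_eq_cell (dp : List (List Int)) (i j : Int) (hi : 0 ≤ i) (hj : 0 ≤ j) :
    pvDget dp i j = pvCell dp i.toNat j.toNat := by
  unfold pvDget pvCell
  rw [PySem.List.pyGet?_of_nonneg dp hi, PySem.List.pyGet?_of_nonneg _ hj,
    List.getD_eq_getElem?_getD]

-- shape of the table: 1000 rows of length 1000
def pvShape (dp : List (List Int)) : Prop :=
  dp.length = 1000 ∧ ∀ r, r < 1000 → (dp[r]?.getD []).length = 1000

lemma pvShape_dset (dp : List (List Int)) (h : pvShape dp) (i j : Nat)
    (hi : i < 1000) (v : Int) : pvShape (pvDset dp (i : Int) (j : Int) v) := by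
  obtain ⟨h1, h2⟩ := h
  unfold pvDset
  refine ⟨by simp [h1], ?_⟩
  intro r hr
  rw [PySem.List.pyGet?_of_nonneg dp (Int.natCast_nonneg i)]
  simp only [Int.toNat_natCast]
  by_cases hri : i = r
  · subst hri
    rw [List.getElem?_set, if_pos rfl, if_pos (by omega)]
    simp only [Option.getD_some, List.length_set]
    exact h2 i hr
  · rw [List.getElem?_set, if_neg hri]
    exact h2 r hr

lemma pvCell_dset (dp : List (List Int)) (h : pvShape dp) (i j : Nat)
    (hi : i < 1000) (hj : j < 1000) (v : Int) (r c : Nat) (hr : r < 1000) (hc : c < 1000) :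
    pvCell (pvDset dp (i : Int) (j : Int) v) r c
      = if r = i ∧ c = j then v else pvCell dp r c := by
  obtain ⟨h1, h2⟩ := h
  unfold pvDset pvCell
  rw [PySem.List.pyGet?_of_nonneg dp (Int.natCast_nonneg i)]
  simp only [Int.toNat_natCast]
  by_cases hri : r = i
  · subst hri
    have hrlt : r < dp.length := by omega
    have hdp : dp[r]? = some (dp[r]'hrlt) := List.getElem?_eq_getElem hrlt
    have hlen : (dp[r]'hrlt).length = 1000 := by
      have := h2 r hr; rw [hdp] at this; simpa using this
    rw [List.getElem?_set, if_pos rfl, if_pos hrlt]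
    simp only [Option.getD_some]
    rw [hdp]
    simp only [Option.getD_some]
    rw [List.getD_eq_getElem?_getD, List.getElem?_set]
    by_cases hcj : c = j
    · subst hcj
      rw [if_pos rfl, if_pos (by omega)]
      simp
    · rw [if_neg (fun hh => hcj hh.symm)]
      simp [hcj, List.getD_eq_getElem?_getD]
  · rw [List.getElem?_set, if_neg (fun hh => hri hh.symm)]
    simp [hri]


-- the inner-loop body of port A, abstracted over the row index i
def pvBody (xs ys : List Char) (i : Int) : List (List Int) → Int → List (List Int) :=
  fun dp j =>
    if PySem.List.pyGet? xs (j-1) = PySem.List.pyGet? ys (i-1)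
    then pvDset dp i j (1 + pvDget dp (i-1) (j-1))
    else pvDset dp i j (pvDget dp i (j-1))

-- intended contents of the table: rows 1..d complete, row d+1 filled up to column t
def pvVal (xs ys : List Char) (n' d t r c : Nat) : Int :=
  if 1 ≤ c ∧ c ≤ n' ∧ 1 ≤ r ∧ (r ≤ d ∨ (r = d + 1 ∧ c ≤ t)) then pvDpf xs ys r c else 0

def pvInv (xs ys : List Char) (n' : Nat) (dp : List (List Int)) (d t : Nat) : Prop :=
  pvShape dp ∧ ∀ r c : Nat, r < 1000 → c < 1000 → pvCell dp r c = pvVal xs ys n' d t r c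

lemma pvInv_init (xs ys : List Char) (n' : Nat) :
    pvInv xs ys n' (List.replicate 1000 (List.replicate 1000 0)) 0 0 := by
  constructor
  · constructor
    · rw [List.length_replicate]
    · intro r hr
      rw [List.getElem?_replicate, if_pos hr]
      simp only [Option.getD_some]
      rw [List.length_replicate]
  · intro r c hr hc
    unfold pvCell pvVal
    rw [List.getElem?_replicate, if_pos hr]
    simp only [Option.getD_some]
    rw [List.getD_eq_getElem?_getD, List.getElem?_replicate, if_pos hc]
    simp only [Option.getD_some]
    split
    · omega
    · rfl

lemma pvVal_shift (xs ys : List Char) (n' d r c : Nat) :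
    pvVal xs ys n' (d + 1) 0 r c = pvVal xs ys n' d n' r c := by
  unfold pvVal
  split_ifs with h1 h2
  · rfl
  · exfalso; omega
  · exfalso; omega
  · rfl

lemma pvStep (xs ys : List Char) (n m : Int) (d t : Nat) (dp : List (List Int))
    (hm : m ≤ 999) (hn : n ≤ 999) (hn1 : 1 ≤ n)
    (hnx : n ≤ (xs.length : Int)) (hmy : m ≤ (ys.length : Int))
    (hd : (d : Int) < m) (ht : (t : Int) < n)
    (hInv : pvInv xs ys n.toNat dp d t) :
    pvInv xs ys n.toNat (pvBody xs ys ((d : Int) + 1) dp ((t : Int) + 1)) d (t + 1) := by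
  obtain ⟨hShape, hCells⟩ := hInv
  have htx : t < xs.length := by omega
  have hdy : d < ys.length := by omega
  have hd1000 : d + 1 < 1000 := by omega
  have ht1000 : t + 1 < 1000 := by omega
  have hxg : PySem.List.pyGet? xs ((t : Int) + 1 - 1) = some xs[t] := by
    have : (t : Int) + 1 - 1 = (t : Int) := by ring
    rw [this, PySem.List.pyGet?_eq_some_getElem xs (by omega) (by omega)]
    simp
  have hyg : PySem.List.pyGet? ys ((d : Int) + 1 - 1) = some ys[d] := by
    have : (d : Int) + 1 - 1 = (d : Int) := by ring
    rw [this, PySem.List.pyGet?_eq_some_getElem ys (by omega) (by omega)]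
    simp
  have hread1 : pvDget dp ((d : Int) + 1 - 1) ((t : Int) + 1 - 1) = pvDpf xs ys d t := by
    have e1 : (d : Int) + 1 - 1 = ((d : Nat) : Int) := by ring
    have e2 : (t : Int) + 1 - 1 = ((t : Nat) : Int) := by ring
    rw [e1, e2, pvDget_eq_cell _ _ _ (by omega) (by omega)]
    simp only [Int.toNat_natCast]
    rw [hCells d t (by omega) (by omega)]
    unfold pvVal
    split_ifs with hcond
    · rfl
    · rcases Nat.eq_zero_or_pos d with hd0 | hd0
      · subst hd0; simp [pvDpf]
      · rcases Nat.eq_zero_or_pos t with ht0 | ht0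
        · subst ht0; rw [pvDpf_zero_right]
        · exfalso; apply hcond; omega
  have hread2 : pvDget dp ((d : Int) + 1) ((t : Int) + 1 - 1) = pvDpf xs ys (d + 1) t := by
    have e1 : (d : Int) + 1 = ((d + 1 : Nat) : Int) := by push_cast; ring
    have e2 : (t : Int) + 1 - 1 = ((t : Nat) : Int) := by ring
    rw [e1, e2, pvDget_eq_cell _ _ _ (by omega) (by omega)]
    simp only [Int.toNat_natCast]
    rw [hCells (d + 1) t (by omega) (by omega)]
    unfold pvVal
    split_ifs with hcond
    · rfl
    · rcases Nat.eq_zero_or_pos t with ht0 | ht0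
      · subst ht0; rw [pvDpf_zero_right]
      · exfalso; apply hcond; omega
  have hgd : xs.getD t ' ' = xs[t] := by
    rw [List.getD_eq_getElem?_getD, List.getElem?_eq_getElem htx]; rfl
  have hgd2 : ys.getD d ' ' = ys[d] := by
    rw [List.getD_eq_getElem?_getD, List.getElem?_eq_getElem hdy]; rfl
  have hnewval :
      (if PySem.List.pyGet? xs ((t : Int) + 1 - 1) = PySem.List.pyGet? ys ((d : Int) + 1 - 1)
       then 1 + pvDget dp ((d : Int) + 1 - 1) ((t : Int) + 1 - 1)
       else pvDget dp ((d : Int) + 1) ((t : Int) + 1 - 1)) = pvDpf xs ys (d + 1) (t + 1) := by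
    rw [hxg, hyg, hread1, hread2, pvDpf, hgd, hgd2]
    by_cases hcc : xs[t] = ys[d]
    · rw [if_pos (by rw [hcc]), if_pos hcc]; ring
    · rw [if_neg (by simpa using hcc), if_neg hcc]
  have hbody : pvBody xs ys ((d : Int) + 1) dp ((t : Int) + 1)
      = pvDset dp (((d + 1 : Nat) : Int)) (((t + 1 : Nat) : Int))
          (pvDpf xs ys (d + 1) (t + 1)) := by
    unfold pvBody
    have e1 : (d : Int) + 1 = ((d + 1 : Nat) : Int) := by push_cast; ring
    have e2 : (t : Int) + 1 = ((t + 1 : Nat) : Int) := by push_cast; ring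
    split_ifs with hc
    · rw [← hnewval, if_pos hc, e1, e2]
    · rw [← hnewval, if_neg hc, e1, e2]
  rw [hbody]
  constructor
  · exact pvShape_dset dp ⟨hShape.1, hShape.2⟩ (d + 1) (t + 1) hd1000 _
  · intro r c hr hc
    rw [pvCell_dset dp ⟨hShape.1, hShape.2⟩ (d + 1) (t + 1) hd1000 ht1000 _ r c hr hc]
    by_cases hrc : r = d + 1 ∧ c = t + 1
    · obtain ⟨hr1, hc1⟩ := hrc
      subst hr1; subst hc1
      rw [if_pos ⟨rfl, rfl⟩]
      unfold pvVal
      rw [if_pos (by omega)]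
    · rw [if_neg hrc, hCells r c hr hc]
      unfold pvVal
      split_ifs with h1 h2 <;> first | rfl | (exfalso; omega)


lemma pvRow (xs ys : List Char) (n m : Int) (d : Nat)
    (hm : m ≤ 999) (hn : n ≤ 999) (hn1 : 1 ≤ n)
    (hnx : n ≤ (xs.length : Int)) (hmy : m ≤ (ys.length : Int)) (hd : (d : Int) < m) :
    ∀ t : Nat, (t : Int) ≤ n → ∀ dp : List (List Int), pvInv xs ys n.toNat dp d 0 →
      pvInv xs ys n.toNat
        ((PySem.List.pyRange 1 ((t : Int) + 1)).foldl (pvBody xs ys ((d : Int) + 1)) dp) d t := by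
  intro t
  induction t with
  | zero =>
    intro _ dp hInv
    have h0 : PySem.List.pyRange 1 (((0 : Nat) : Int) + 1) = [] :=
      PySem.List.pyRange_one_eq_nil (by omega)
    rw [h0]
    exact hInv
  | succ t ih =>
    intro ht dp hInv
    have e1 : ((t + 1 : Nat) : Int) + 1 = ((t : Int) + 1) + 1 := by push_cast; ring
    have hsplit : PySem.List.pyRange 1 (((t : Int) + 1) + 1)
        = PySem.List.pyRange 1 ((t : Int) + 1) ++ [(t : Int) + 1] :=
      PySem.List.pyRange_one_succ_right (by omega)
    rw [e1, hsplit, List.foldl_append]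
    simp only [List.foldl_cons, List.foldl_nil]
    exact pvStep xs ys n m d t _ hm hn hn1 hnx hmy hd (by omega)
      (ih (by omega) dp hInv)

lemma pvTable (xs ys : List Char) (n m : Int)
    (hm : m ≤ 999) (hn : n ≤ 999) (hn1 : 1 ≤ n)
    (hnx : n ≤ (xs.length : Int)) (hmy : m ≤ (ys.length : Int)) :
    ∀ d : Nat, (d : Int) ≤ m →
      pvInv xs ys n.toNat
        ((PySem.List.pyRange 1 ((d : Int) + 1)).foldl
          (fun dp i => (PySem.List.pyRange 1 (n + 1)).foldl (pvBody xs ys i) dp)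
          (List.replicate 1000 (List.replicate 1000 0))) d 0 := by
  intro d
  induction d with
  | zero =>
    intro _
    have h0 : PySem.List.pyRange 1 (((0 : Nat) : Int) + 1) = [] :=
      PySem.List.pyRange_one_eq_nil (by omega)
    rw [h0]
    exact pvInv_init xs ys n.toNat
  | succ d ih =>
    intro hd
    have e1 : ((d + 1 : Nat) : Int) + 1 = ((d : Int) + 1) + 1 := by push_cast; ring
    have hsplit : PySem.List.pyRange 1 (((d : Int) + 1) + 1)
        = PySem.List.pyRange 1 ((d : Int) + 1) ++ [(d : Int) + 1] :=
      PySem.List.pyRange_one_succ_right (by omega)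
    rw [e1, hsplit, List.foldl_append]
    simp only [List.foldl_cons, List.foldl_nil]
    have hrow := pvRow xs ys n m d hm hn hn1 hnx hmy (by omega) n.toNat (by omega) _
      (ih (by omega))
    have e2 : (n.toNat : Int) + 1 = n + 1 := by omega
    rw [e2] at hrow
    obtain ⟨hShape, hCells⟩ := hrow
    refine ⟨hShape, ?_⟩
    intro r c hr hc
    rw [hCells r c hr hc, ← pvVal_shift]


-- dropping the last element of both sides of a sublist of append-singletons
lemma pvSub_dropLast {α : Type} (w v : List α) (c d : α) :
    (w ++ [c]).Sublist (v ++ [d]) → w.Sublist v := by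
  intro h
  have h' := h.reverse
  simp only [List.reverse_append, List.reverse_cons, List.reverse_nil, List.nil_append,
    List.cons_append] at h'
  cases h' with
  | cons _ h2 => exact List.reverse_sublist.mp (List.sublist_of_cons_sublist h2)
  | cons₂ _ h2 => exact List.reverse_sublist.mp h2

lemma pvSub_lastNe {α : Type} (w v : List α) (c d : α) (hne : c ≠ d) :
    (w ++ [c]).Sublist (v ++ [d]) → (w ++ [c]).Sublist v := by
  intro h
  have h' := h.reverse
  simp only [List.reverse_append, List.reverse_cons, List.reverse_nil, List.nil_append,
    List.cons_append] at h'
  cases h' with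
  | cons _ h2 =>
    have : (w ++ [c]).reverse.Sublist v.reverse := by
      simpa [List.reverse_append] using h2
    exact List.reverse_sublist.mp this
  | cons₂ _ h2 => exact absurd rfl hne

lemma pvTake_succ_getElem {α : Type} [Inhabited α] (l : List α) (i : Nat) (h : i < l.length) :
    l.take (i + 1) = l.take i ++ [l[i]] := by
  rw [List.take_add_one, List.getElem?_eq_getElem h]
  rfl

-- (D1) the DP value is achieved: the suffix of that length is a subsequence
lemma pvDpf_witness (xs ys : List Char) :
    ∀ i j : Nat, i ≤ ys.length → j ≤ xs.length →
      ((ys.take i).drop (i - (pvDpf xs ys i j).toNat)).Sublist (xs.take j) := by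
  intro i
  induction i with
  | zero => intro j _ _; simp
  | succ i ih =>
    intro j hi hj
    induction j with
    | zero =>
      rw [pvDpf_zero_right]
      have : (ys.take (i+1)).drop (i + 1 - (0:Int).toNat) = [] := by
        apply List.drop_eq_nil_of_le
        rw [List.length_take]; omega
      rw [this]
      simp
    | succ j ihj =>
      have hy : ys.take (i+1) = ys.take i ++ [ys[i]] := pvTake_succ_getElem ys i (by omega)
      have hx : xs.take (j+1) = xs.take j ++ [xs[j]] := pvTake_succ_getElem xs j (by omega)
      have hgdx : xs.getD j ' ' = xs[j] := by
        rw [List.getD_eq_getElem?_getD, List.getElem?_eq_getElem (by omega : j < xs.length)]; rfl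
      have hgdy : ys.getD i ' ' = ys[i] := by
        rw [List.getD_eq_getElem?_getD, List.getElem?_eq_getElem (by omega : i < ys.length)]; rfl
      rw [pvDpf, hgdx, hgdy]
      by_cases hcc : xs[j] = ys[i]
      · rw [if_pos hcc]
        have hd0 := pvDpf_nonneg xs ys i j
        have hdle := pvDpf_le xs ys i j
        have e1 : (pvDpf xs ys i j + 1).toNat = (pvDpf xs ys i j).toNat + 1 := by omega
        rw [e1, hy, hx]
        have e2 : i + 1 - ((pvDpf xs ys i j).toNat + 1) = i - (pvDpf xs ys i j).toNat := by omega
        rw [e2, List.drop_append_of_le_length (by rw [List.length_take]; omega)]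
        exact List.Sublist.append (ih j (by omega) (by omega)) (by rw [hcc])
      · rw [if_neg hcc]
        have := ihj (by omega)
        rw [hx]
        exact this.trans (List.sublist_append_left _ _)

-- (D2) the DP value is maximal among subsequence-suffixes
lemma pvDpf_ge (xs ys : List Char) :
    ∀ i : Nat, ∀ j l : Nat, i ≤ ys.length → j ≤ xs.length → l ≤ i →
      ((ys.take i).drop (i - l)).Sublist (xs.take j) → (l : Int) ≤ pvDpf xs ys i j := by
  intro i
  induction i with
  | zero => intro j l _ _ hl _; simp [pvDpf]; omega
  | succ i ih =>
    intro j l hi hj hl hs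
    induction j with
    | zero =>
      have hlen : ((ys.take (i+1)).drop (i + 1 - l)).length = l := by
        rw [List.length_drop, List.length_take]; omega
      rw [List.take_zero, List.sublist_nil] at hs
      rw [hs] at hlen
      simp at hlen
      rw [pvDpf_zero_right]; omega
    | succ j ihj =>
      cases l with
      | zero => have := pvDpf_nonneg xs ys (i+1) (j+1); omega
      | succ l =>
        have hy : ys.take (i+1) = ys.take i ++ [ys[i]] := pvTake_succ_getElem ys i (by omega)
        have hx : xs.take (j+1) = xs.take j ++ [xs[j]] := pvTake_succ_getElem xs j (by omega)
        have hgdx : xs.getD j ' ' = xs[j] := by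
          rw [List.getD_eq_getElem?_getD, List.getElem?_eq_getElem (by omega : j < xs.length)]; rfl
        have hgdy : ys.getD i ' ' = ys[i] := by
          rw [List.getD_eq_getElem?_getD, List.getElem?_eq_getElem (by omega : i < ys.length)]; rfl
        have e2 : i + 1 - (l + 1) = i - l := by omega
        have hseg : (ys.take (i+1)).drop (i + 1 - (l+1))
            = (ys.take i).drop (i - l) ++ [ys[i]] := by
          rw [hy, e2, List.drop_append_of_le_length (by rw [List.length_take]; omega)]
        rw [hseg, hx] at hs
        rw [pvDpf, hgdx, hgdy]
        by_cases hcc : xs[j] = ys[i]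
        · rw [if_pos hcc]
          have := ih j l (by omega) (by omega) (by omega) (pvSub_dropLast _ _ _ _ hs)
          omega
        · rw [if_neg hcc]
          have hs' : ((ys.take (i+1)).drop (i + 1 - (l+1))).Sublist (xs.take j) := by
            rw [hseg]
            exact pvSub_lastNe _ _ _ _ (fun hh => hcc hh.symm) hs
          exact ihj (by omega) hs'

-- fold-max utilities
lemma pvFoldMax_init {α : Type} (l : List α) (f : α → Int) :
    ∀ a : Int, a ≤ l.foldl (fun x k => max x (f k)) a := by
  induction l with
  | nil => intro a; simp
  | cons b bs ih =>
    intro a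
    simp only [List.foldl_cons]
    exact le_trans (le_max_left a (f b)) (ih _)

lemma pvFoldMax_elem {α : Type} (l : List α) (f : α → Int) :
    ∀ a : Int, ∀ k ∈ l, f k ≤ l.foldl (fun x k => max x (f k)) a := by
  induction l with
  | nil => intro a k hk; simp at hk
  | cons b bs ih =>
    intro a k hk
    simp only [List.foldl_cons]
    rcases List.mem_cons.mp hk with h | h
    · subst h
      exact le_trans (le_max_right a (f k)) (pvFoldMax_init bs f _)
    · exact ih _ k h

lemma pvFoldMax_le {α : Type} (l : List α) (f : α → Int) :
    ∀ a c : Int, a ≤ c → (∀ k ∈ l, f k ≤ c) → l.foldl (fun x k => max x (f k)) a ≤ c := by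
  induction l with
  | nil => intro a c h _; simpa using h
  | cons b bs ih =>
    intro a c h he
    simp only [List.foldl_cons]
    exact ih _ c (max_le h (he b (by simp))) (fun k hk => he k (List.mem_cons_of_mem _ hk))

lemma pvIfMax (a c : Int) : (if c > a then c else a) = max a c := by
  rw [max_def]
  split_ifs <;> omega


lemma pvFoldlId {α β : Type} (l : List α) (dp : β) : l.foldl (fun d _ => d) dp = dp := by
  induction l with
  | nil => rfl
  | cons b bs ih => simp only [List.foldl_cons]; exact ih

lemma pvFoldMaxZero {α : Type} (l : List α) : ∀ a : Int, 0 ≤ a →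
    l.foldl (fun x _ => max x (0:Int)) a = a := by
  induction l with
  | nil => intro a _; rfl
  | cons b bs ih =>
    intro a ha
    simp only [List.foldl_cons]
    rw [max_eq_left ha]
    exact ih a ha

-- main-case core: the two folds over List.range m' are equal
lemma pvMaxEq (X Y : List Char) (n' m' : Nat)
    (hnx : n' ≤ X.length) (hmy : m' ≤ Y.length) :
    (List.range m').foldl (fun a k => max a (pvDpf X Y (k+1) n')) 0
      = (List.range m').foldl
          (fun a k => max a ((pvGre (X.take n') ((Y.take m').drop k) : Nat) : Int)) 0 := by
  apply le_antisymm
  · apply pvFoldMax_le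
    · exact pvFoldMax_init _ _ 0
    · intro k hk
      have hkm : k < m' := List.mem_range.mp hk
      have hwit := pvDpf_witness X Y (k+1) n' (by omega) (by omega)
      have hd0 := pvDpf_nonneg X Y (k+1) n'
      have hdle := pvDpf_le X Y (k+1) n'
      set d := pvDpf X Y (k+1) n' with hd
      set l := d.toNat with hl
      rcases Nat.eq_zero_or_pos l with hl0 | hl0
      · have : d = 0 := by omega
        rw [this]
        exact pvFoldMax_init _ _ 0
      · set s := k + 1 - l with hs
        have hsm : s < m' := by omega
        have hseg : ((Y.take m').drop s).take l = (Y.take (k+1)).drop (k + 1 - l) := by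
          rw [List.drop_take, List.drop_take, List.take_take]
          have e1 : k + 1 - (k + 1 - l) = l := by omega
          have e2 : min l (m' - s) = l := by omega
          rw [e1, e2]
        have hzlen : l ≤ ((Y.take m').drop s).length := by
          rw [List.length_drop, List.length_take]; omega
        have hge := pvGre_ge (X.take n') ((Y.take m').drop s) l hzlen (by rw [hseg]; exact hwit)
        have hB := pvFoldMax_elem (List.range m')
          (fun k => ((pvGre (X.take n') ((Y.take m').drop k) : Nat) : Int)) 0 s
          (List.mem_range.mpr hsm)
        have : d ≤ ((pvGre (X.take n') ((Y.take m').drop s) : Nat) : Int) := by omega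
        exact le_trans this hB
  · apply pvFoldMax_le
    · exact pvFoldMax_init _ _ 0
    · intro k hk
      have hkm : k < m' := List.mem_range.mp hk
      set l := pvGre (X.take n') ((Y.take m').drop k) with hl
      have hwit := pvGre_take_sublist (X.take n') ((Y.take m').drop k)
      have hlen : l ≤ m' - k := by
        have := pvGre_le_length (X.take n') ((Y.take m').drop k)
        rw [List.length_drop, List.length_take] at this
        omega
      rcases Nat.eq_zero_or_pos l with hl0 | hl0
      · rw [hl0]
        exact le_trans (by omega) (pvFoldMax_init _ _ 0)
      · set i := k + l with hi
        have him : i ≤ m' := by omega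
        have hseg : ((Y.take m').drop k).take l = (Y.take i).drop (i - l) := by
          rw [List.drop_take, List.drop_take, List.take_take]
          have e1 : i - (i - l) = l := by omega
          have e2 : min l (m' - k) = l := by omega
          have e3 : i - l = k := by omega
          rw [e1, e2, e3]
        have hge := pvDpf_ge X Y i n' l (by omega) (by omega) (by omega)
          (by rw [← hseg]; exact hwit)
        have hA := pvFoldMax_elem (List.range m')
          (fun k => pvDpf X Y (k+1) n') 0 (i-1) (List.mem_range.mpr (by omega))
        simp only [] at hA
        have e4 : i - 1 + 1 = i := by omega
        rw [e4] at hA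
        exact le_trans hge hA

-- ===== VERDICT (by name: the statement is the Claim_ definition above) =====
theorem maxSubsequenceSubstring_spec : Claim_equal_maxSubsequenceSubstring := by
  intro x y n m _hdom hpre
  unfold Spec_maxSubsequenceSubstring
  have hA : maxSubsequenceSubstring x y n m
      = (PySem.List.pyRange 1 (m+1)).foldl
          (fun ans i => max ans (pvDget
            ((PySem.List.pyRange 1 (m+1)).foldl
              (fun dp i => (PySem.List.pyRange 1 (n+1)).foldl (pvBody x.toList y.toList i) dp)
              (List.replicate 1000 (List.replicate 1000 0))) i n)) 0 := rfl
  have hB : maxSubsequenceSubstring_alt x y n m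
      = (PySem.List.pyRange 0 m).foldl (fun ans s =>
          if pvBLoop x.toList y.toList n m s 0 0 > ans
          then pvBLoop x.toList y.toList n m s 0 0 else ans) 0 := rfl
  rw [hA, hB]
  rcases hpre with hm0 | ⟨hm1, hm999, hrest⟩
  · -- m ≤ 0: all three ranges are empty, both sides are 0
    rw [PySem.List.pyRange_one_eq_nil (show m + 1 ≤ 1 by omega),
        PySem.List.pyRange_one_eq_nil (show m ≤ 0 from hm0)]
    rfl
  · rcases hrest with ⟨hnlo, hnhi⟩ | ⟨hn1, hn999, hnx, hmy⟩
    · -- 1 ≤ m ≤ 999 and -1000 ≤ n ≤ 0: the table stays all-zero, B's loop exits at once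
      have hinner : PySem.List.pyRange 1 (n+1) = [] :=
        PySem.List.pyRange_one_eq_nil (by omega)
      rw [hinner]
      simp only [List.foldl_nil]
      rw [pvFoldlId (PySem.List.pyRange 1 (m+1)) (List.replicate 1000 (List.replicate 1000 (0:Int)))]
      have hAc : (PySem.List.pyRange 1 (m+1)).foldl
          (fun ans i => max ans (pvDget (List.replicate 1000 (List.replicate 1000 0)) i n)) 0
          = (PySem.List.pyRange 1 (m+1)).foldl (fun ans (_ : Int) => max ans (0:Int)) 0 := by
        apply PySem.List.foldl_congr_mem
        intro acc i hi
        rcases PySem.List.mem_pyRange_one.mp hi with ⟨hi1, hi2⟩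
        have hr : pvDget (List.replicate 1000 (List.replicate 1000 (0:Int))) i n = 0 := by
          unfold pvDget
          rw [PySem.List.pyGet?_of_nonneg (List.replicate 1000 (List.replicate 1000 (0:Int)))
                (show (0:Int) ≤ i by omega),
              List.getElem?_replicate, if_pos (show i.toNat < 1000 by omega)]
          simp only [Option.getD_some]
          cases h : PySem.List.pyGet? (List.replicate 1000 (0:Int)) n with
          | none => rfl
          | some v =>
            have hv := List.eq_of_mem_replicate (PySem.List.mem_of_pyGet?_eq_some _ h)
            rw [hv]; rfl
        rw [hr]
      have hBc : (PySem.List.pyRange 0 m).foldl (fun ans s =>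
            if pvBLoop x.toList y.toList n m s 0 0 > ans
            then pvBLoop x.toList y.toList n m s 0 0 else ans) 0
          = (PySem.List.pyRange 0 m).foldl (fun ans (_ : Int) => max ans (0:Int)) 0 := by
        apply PySem.List.foldl_congr_mem
        intro acc s hs
        have hb : pvBLoop x.toList y.toList n m s 0 0 = 0 := by
          rw [pvBLoop, dif_neg (by omega)]
        rw [hb, pvIfMax]
      rw [hAc, hBc, pvFoldMaxZero _ 0 le_rfl, pvFoldMaxZero _ 0 le_rfl]
    · -- main case: 1 ≤ n ≤ 999, n ≤ |x|, 1 ≤ m ≤ 999, m ≤ |y|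
      have htab : pvInv x.toList y.toList n.toNat
          ((PySem.List.pyRange 1 ((m.toNat : Int) + 1)).foldl
            (fun dp i => (PySem.List.pyRange 1 (n+1)).foldl (pvBody x.toList y.toList i) dp)
            (List.replicate 1000 (List.replicate 1000 0))) m.toNat 0 :=
        pvTable x.toList y.toList n m hm999 hn999 hn1 hnx hmy m.toNat (by omega)
      have em : (m.toNat : Int) + 1 = m + 1 := by omega
      rw [em] at htab
      obtain ⟨hShape, hCells⟩ := htab
      set dpF := (PySem.List.pyRange 1 (m+1)).foldl
        (fun dp i => (PySem.List.pyRange 1 (n+1)).foldl (pvBody x.toList y.toList i) dp)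
        (List.replicate 1000 (List.replicate 1000 0)) with hdpF
      have hAc : (PySem.List.pyRange 1 (m+1)).foldl
            (fun ans i => max ans (pvDget dpF i n)) 0
          = (PySem.List.pyRange 1 (m+1)).foldl
            (fun ans i => max ans (pvDpf x.toList y.toList i.toNat n.toNat)) 0 := by
        apply PySem.List.foldl_congr_mem
        intro acc i hi
        rcases PySem.List.mem_pyRange_one.mp hi with ⟨hi1, hi2⟩
        rw [pvDget_eq_cell dpF i n (by omega) (by omega),
          hCells i.toNat n.toNat (by omega) (by omega)]
        unfold pvVal
        rw [if_pos (by omega)]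
      have hBc : (PySem.List.pyRange 0 m).foldl (fun ans s =>
            if pvBLoop x.toList y.toList n m s 0 0 > ans
            then pvBLoop x.toList y.toList n m s 0 0 else ans) 0
          = (PySem.List.pyRange 0 m).foldl (fun ans s =>
            max ans ((pvGre (x.toList.take n.toNat)
              ((y.toList.take m.toNat).drop s.toNat) : Nat) : Int)) 0 := by
        apply PySem.List.foldl_congr_mem
        intro acc s hs
        rcases PySem.List.mem_pyRange_one.mp hs with ⟨hs1, hs2⟩
        have hb := pvBLoop_eq x.toList y.toList n m s hnx hmy hs1
          (n - 0).toNat 0 0 rfl le_rfl le_rfl (by omega)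
        have e0 : (s + 0).toNat = s.toNat := by omega
        rw [e0] at hb
        simp only [List.drop_zero, Int.toNat_zero, zero_add] at hb
        rw [hb, pvIfMax]
      rw [hAc, hBc]
      -- turn both pyRange folds into folds over List.range m.toNat
      rw [PySem.List.pyRange_one 1 (m+1), PySem.List.pyRange_one 0 m, List.foldl_map,
        List.foldl_map]
      have e1 : (m + 1 - 1).toNat = m.toNat := by omega
      have e2 : (m - 0).toNat = m.toNat := by omega
      rw [e1, e2]
      have hAc2 : (List.range m.toNat).foldl
            (fun (a : Int) (k : Nat) => max a (pvDpf x.toList y.toList (1 + (k:Int)).toNat n.toNat)) 0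
          = (List.range m.toNat).foldl
            (fun (a : Int) (k : Nat) => max a (pvDpf x.toList y.toList (k+1) n.toNat)) 0 := by
        apply PySem.List.foldl_congr_mem
        intro acc k _
        have : (1 + (k:Int)).toNat = k + 1 := by omega
        rw [this]
      have hBc2 : (List.range m.toNat).foldl
            (fun (a : Int) (k : Nat) => max a ((pvGre (x.toList.take n.toNat)
              ((y.toList.take m.toNat).drop (0 + (k:Int)).toNat) : Nat) : Int)) 0
          = (List.range m.toNat).foldl
            (fun (a : Int) (k : Nat) => max a ((pvGre (x.toList.take n.toNat)
              ((y.toList.take m.toNat).drop k) : Nat) : Int)) 0 := by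
        apply PySem.List.foldl_congr_mem
        intro acc k _
        have : ((0:Int) + (k:Int)).toNat = k := by omega
        rw [this]
      rw [hAc2, hBc2]
      exact pvMaxEq x.toList y.toList n.toNat m.toNat (by omega) (by omega)
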